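-- pv_equiv track=rewrite | github.com/nyampire/jartic2geojson | utils/file-handler.py | _extract_csv_lines
-- ===== SOURCE A (Python) =====
-- from typing import List, Optional, Tuple, Dict, Any
--
-- def _extract_csv_lines(lines: List[str]) -> List[str]:
--     """
--     テキスト行からCSVとして解析できる行を抽出する
--
--     Args:
--         lines: テキスト行のリスト
--
--     Returns:
--         List[str]: CSVとして解析できる行のリスト
--     """
--     csv_lines = []
--     header_found = False
--     csv_data_started = False
--
--     for line in lines:
--         # ファイル名やヘッダーのような行をスキップ
--         if line.startswith('==>') or line.startswith('<=='):
--             continue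
--
--         # CSVデータの行かどうかを判断
--         if '"' in line and ',' in line:
--             if not header_found:
--                 header_found = True
--             csv_data_started = True
--             csv_lines.append(line)
--         elif csv_data_started and line.strip():
--             # CSVデータが始まった後の非空行
--             csv_lines.append(line)
--
--     return csv_lines
-- ===== SOURCE B (Python) =====
-- from typing import List
--
-- def _extract_csv_lines(lines: List[str]) -> List[str]:
--     def is_marker(line: str) -> bool:
--         return line.startswith('==>') or line.startswith('<==')
--
--     def is_csv(line: str) -> bool:
--         return '"' in line and ',' in line
--
--     for i, line in enumerate(lines):
--         if not is_marker(line) and is_csv(line):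
--             return [l for l in lines[i:] if not is_marker(l) and l.strip()]
--     return []
-- ===== Notes on version B (the rewrite author's own statement) =====
-- stated objective: simpler
-- what changed: Replaces the stateful flag-driven single loop with a two-phase decomposition: locate the first non-marker CSV line, then filter the remaining suffix for non-marker non-blank lines.
import Mathlib
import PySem

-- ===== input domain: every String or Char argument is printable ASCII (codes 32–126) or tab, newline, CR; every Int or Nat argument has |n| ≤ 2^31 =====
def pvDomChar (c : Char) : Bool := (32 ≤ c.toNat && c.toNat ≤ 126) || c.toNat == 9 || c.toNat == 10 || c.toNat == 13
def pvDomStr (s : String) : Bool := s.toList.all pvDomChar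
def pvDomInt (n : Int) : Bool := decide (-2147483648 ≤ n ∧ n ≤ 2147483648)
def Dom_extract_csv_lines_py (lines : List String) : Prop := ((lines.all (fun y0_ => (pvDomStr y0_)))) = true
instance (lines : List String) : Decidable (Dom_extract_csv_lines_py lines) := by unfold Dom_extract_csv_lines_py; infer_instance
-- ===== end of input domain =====

-- B replaces A's stateful flag-driven loop with a two-phase decomposition (find the
-- first non-marker CSV line, then filter the suffix); objective: simpler.


-- ===== PORT A =====
def extract_csv_lines_py (lines : List String) : List String :=
  (lines.foldl
    (fun (st : List String × Bool × Bool) line =>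
      let csv_lines := st.1
      let header_found := st.2.1
      let csv_data_started := st.2.2
      if PySem.Str.startswith line "==>" || PySem.Str.startswith line "<==" then
        st
      else if PySem.Str.isIn "\"" line && PySem.Str.isIn "," line then
        (csv_lines ++ [line], true, true)
      else if csv_data_started && (PySem.Str.strip line != "") then
        (csv_lines ++ [line], header_found, csv_data_started)
      else st)
    ([], false, false)).1

-- ===== PORT B =====
def pvIsMarker (line : String) : Bool :=
  PySem.Str.startswith line "==>" || PySem.Str.startswith line "<=="

def pvIsCsv (line : String) : Bool :=
  PySem.Str.isIn "\"" line && PySem.Str.isIn "," line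

-- Source B's scan: find the first non-marker CSV line, then filter the suffix from it on.
def pvScan : List String → List String
  | [] => []
  | l :: ls =>
    if !pvIsMarker l && pvIsCsv l then
      (l :: ls).filter (fun x => !pvIsMarker x && (PySem.Str.strip x != ""))
    else
      pvScan ls

def extract_csv_lines_py_alt (lines : List String) : List String :=
  pvScan lines

-- ===== PRECONDITION & SPEC =====
def Spec_extract_csv_lines_py (lines : List String) (out : List String) : Prop := out = extract_csv_lines_py_alt lines
instance (lines : List String) (out : List String) : Decidable (Spec_extract_csv_lines_py lines out) := by unfold Spec_extract_csv_lines_py; infer_instance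

-- ===== CLAIM (what is proved, stated in full; the proofs are below) =====
def Claim_equal_extract_csv_lines_py : Prop := ∀ (lines : List String), Dom_extract_csv_lines_py lines → Spec_extract_csv_lines_py lines (extract_csv_lines_py lines)

-- ===== LEMMAS AND PROOFS =====

-- a string containing a non-whitespace char has a non-empty strip
lemma chars_strip_ne_nil {c : Char} {s : List Char} (hc : PySem.Chars.isspace c = false)
    (hm : c ∈ s) : PySem.Chars.strip s ≠ [] := by
  intro he
  unfold PySem.Chars.strip PySem.Chars.rstrip PySem.Chars.lstrip at he
  rw [List.reverse_eq_nil_iff, List.dropWhile_eq_nil_iff] at he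
  have hall : ∀ x ∈ List.dropWhile PySem.Chars.isspace s, PySem.Chars.isspace x = true := by
    intro x hx
    exact he x (by simpa using hx)
  rcases (by rw [List.takeWhile_append_dropWhile] ; exact hm :
      c ∈ List.takeWhile PySem.Chars.isspace s ++ List.dropWhile PySem.Chars.isspace s)
      |> List.mem_append.mp with h | h
  · exact absurd (List.mem_takeWhile_imp h) (by simp [hc])
  · exact absurd (hall c h) (by simp [hc])

lemma strip_ne_of_csv {line : String} (h : pvIsCsv line = true) :
    (PySem.Str.strip line != "") = true := by
  have hin : PySem.Str.isIn "," line = true := by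
    simp [pvIsCsv] at h; exact h.2
  have hmem : ',' ∈ line.toList := by
    have := (PySem.Str.isIn_iff_infix _ _).mp hin
    simpa using this.mem (by simp : ',' ∈ (",").toList)
  have hne := chars_strip_ne_nil (c := ',') (by decide) hmem
  simp only [bne_iff_ne, ne_eq]
  intro he
  apply hne
  have : (PySem.Str.strip line).toList = ("" : String).toList := by rw [he]
  simpa [PySem.Str.strip] using this

-- A's step function, named for the lemmas
def pvStepA (st : List String × Bool × Bool) (line : String) : List String × Bool × Bool :=
  let csv_lines := st.1
  let header_found := st.2.1
  let csv_data_started := st.2.2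
  if PySem.Str.startswith line "==>" || PySem.Str.startswith line "<==" then st
  else if PySem.Str.isIn "\"" line && PySem.Str.isIn "," line then
    (csv_lines ++ [line], true, true)
  else if csv_data_started && (PySem.Str.strip line != "") then
    (csv_lines ++ [line], header_found, csv_data_started)
  else st

lemma extract_eq_foldl_pvStepA (lines : List String) :
    extract_csv_lines_py lines = (lines.foldl pvStepA ([], false, false)).1 := rfl

def pvKeep (x : String) : Bool := !pvIsMarker x && (PySem.Str.strip x != "")

lemma pvStepA_eq (st : List String × Bool × Bool) (l : String) :
    pvStepA st l =
      if pvIsMarker l then st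
      else if pvIsCsv l then (st.1 ++ [l], true, true)
      else if st.2.2 && (PySem.Str.strip l != "") then (st.1 ++ [l], st.2.1, st.2.2)
      else st := rfl

lemma filter_lambda (ls : List String) :
    ls.filter (fun x => !pvIsMarker x && (PySem.Str.strip x != "")) = ls.filter pvKeep := rfl

-- once csv_data_started is true, A appends exactly the non-marker non-blank lines
lemma foldl_started (ls : List String) : ∀ (acc : List String) (h : Bool),
    (ls.foldl pvStepA (acc, h, true)).1 = acc ++ ls.filter pvKeep := by
  induction ls with
  | nil => simp
  | cons l ls ih =>
    intro acc h
    rw [List.foldl_cons, List.filter_cons]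
    by_cases hm : pvIsMarker l = true
    · have hk : pvKeep l = false := by simp [pvKeep, hm]
      rw [pvStepA_eq]; simp only [hm, if_true, ih, hk]; simp
    · rw [Bool.not_eq_true] at hm
      by_cases hc : pvIsCsv l = true
      · have hk : pvKeep l = true := by
          simp only [pvKeep, hm, Bool.not_false, Bool.true_and]
          exact strip_ne_of_csv hc
        rw [pvStepA_eq]; simp only [hm, hc, if_true, Bool.false_eq_true, if_false, ih, hk]
        simp
      · rw [Bool.not_eq_true] at hc
        by_cases hb : (PySem.Str.strip l != "") = true
        · have hk : pvKeep l = true := by simp [pvKeep, hm, hb]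
          rw [pvStepA_eq]
          simp only [hm, hc, hb, Bool.false_eq_true, if_false, Bool.true_and, if_true, ih, hk]
          simp
        · rw [Bool.not_eq_true] at hb
          have hk : pvKeep l = false := by simp [pvKeep, hm, hb]
          rw [pvStepA_eq]
          simp only [hm, hc, hb, Bool.false_eq_true, if_false, Bool.and_false, ih, hk]

lemma foldl_not_started (ls : List String) :
    (ls.foldl pvStepA ([], false, false)).1 = pvScan ls := by
  induction ls with
  | nil => simp [pvScan]
  | cons l ls ih =>
    rw [List.foldl_cons, pvScan]
    by_cases hm : pvIsMarker l = true
    · rw [pvStepA_eq]; simp only [hm, if_true, Bool.not_true, Bool.false_and,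
        Bool.false_eq_true, if_false, ih]
    · rw [Bool.not_eq_true] at hm
      by_cases hc : pvIsCsv l = true
      · have hk : pvKeep l = true := by
          simp only [pvKeep, hm, Bool.not_false, Bool.true_and]
          exact strip_ne_of_csv hc
        rw [pvStepA_eq]
        simp only [hm, hc, Bool.false_eq_true, if_false, if_true, Bool.not_false, Bool.true_and,
          foldl_started, filter_lambda, List.filter_cons]
        simp only [pvKeep, hm, Bool.not_false, Bool.true_and, bne_iff_ne] at hk
        simp [hk]
      · rw [Bool.not_eq_true] at hc
        rw [pvStepA_eq]
        simp only [hm, hc, Bool.false_eq_true, if_false, Bool.false_and, Bool.not_false,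
          Bool.true_and, ih]

-- ===== VERDICT (by name: the statement is the Claim_ definition above) =====
theorem extract_csv_lines_py_spec : Claim_equal_extract_csv_lines_py := by
  intro lines _
  unfold Spec_extract_csv_lines_py extract_csv_lines_py_alt
  rw [extract_eq_foldl_pvStepA, foldl_not_started]
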